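-- pv_equiv track=rewrite | github.com/ellismckenzielee/codewars-python | hells_kitchen.py | gordon
-- ===== SOURCE A (Python) =====
-- def gordon(a):
--     a = ' '.join(list(map(lambda x: x.upper()+'!!!!', a.split(' '))))
--     for letter in 'AEIOU':
--         if letter == 'A':
--             replacement = '@'
--         else:
--             replacement = '*'
--         a = a.replace(letter, replacement)
--     return a
-- ===== SOURCE B (Python) =====
-- def gordon(a):
--     table = {'A': '@', 'E': '*', 'I': '*', 'O': '*', 'U': '*'}
--     out = []
--     for c in a:
--         if c == ' ':
--             out += '!!!! '
--         else:
--             u = c.upper()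
--             out.append(table.get(u, u))
--     out += '!!!!'
--     return ''.join(out)
-- ===== Notes on version B (the rewrite author's own statement) =====
-- stated objective: alternative
-- what changed: Replaced A's split-on-space/uppercase-map/join pipeline followed by five whole-string replace passes with a single left-to-right scan that emits the exclamation marker before each space and otherwise the uppercased character mapped through a vowel lookup table, appending the marker once at the end.
import Mathlib
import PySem

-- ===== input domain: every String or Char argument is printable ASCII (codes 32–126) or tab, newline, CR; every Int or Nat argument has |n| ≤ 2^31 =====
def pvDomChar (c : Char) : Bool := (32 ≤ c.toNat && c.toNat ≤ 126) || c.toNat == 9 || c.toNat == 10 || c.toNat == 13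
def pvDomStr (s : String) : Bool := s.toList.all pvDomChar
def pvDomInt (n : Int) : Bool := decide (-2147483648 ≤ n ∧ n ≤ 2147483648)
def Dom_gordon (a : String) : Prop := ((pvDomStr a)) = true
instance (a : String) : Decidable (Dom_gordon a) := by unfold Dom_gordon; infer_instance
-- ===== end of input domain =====

-- B replaces A's split/map/join plus five whole-string replace passes by one single
-- left-to-right scan with a vowel lookup table (objective: alternative decomposition).

-- ===== PORT A =====
def gordon (a : String) : String :=
  let a1 := PySem.Str.join " "
    (((PySem.Str.split? a " ").getD []).map (fun x => PySem.Str.upper x ++ "!!!!"))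
  ("AEIOU".toList).foldl (fun acc letter =>
    let replacement := if letter == 'A' then "@" else "*"
    PySem.Str.replace acc (String.ofList [letter]) replacement) a1

-- ===== PORT B =====
def gordonTable : PySem.Dict Char Char :=
  PySem.Dict.ofList [('A','@'), ('E','*'), ('I','*'), ('O','*'), ('U','*')]

def gordon_alt (a : String) : String :=
  let out := a.toList.foldl (fun acc c =>
    if c == ' ' then acc ++ ['!','!','!','!',' ']
    else
      let u := PySem.Chars.upperChar c
      acc ++ [PySem.Dict.getD gordonTable u u]) []
  String.ofList (out ++ ['!','!','!','!'])

-- ===== PRECONDITION & SPEC =====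
def Spec_gordon (a : String) (out : String) : Prop := out = gordon_alt a
instance (a : String) (out : String) : Decidable (Spec_gordon a out) := by unfold Spec_gordon; infer_instance

-- ===== CLAIM (what is proved, stated in full; the proofs are below) =====
def Claim_equal_gordon : Prop := ∀ (a : String), Dom_gordon a → Spec_gordon a (gordon a)

-- ===== LEMMAS AND PROOFS =====

-- prepend a prefix onto the first piece of a split
def preF (p : List Char) : List (List Char) → List (List Char)
  | [] => [p]
  | w :: ws => (p ++ w) :: ws

-- structural recursion computing Python's s.split(' ')
def split1 : List Char → List (List Char)
  | [] => [[]]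
  | c :: t => if c == ' ' then [] :: split1 t else preF [c] (split1 t)

theorem split1_ne_nil (l : List Char) : split1 l ≠ [] := by
  cases l with
  | nil => simp [split1]
  | cons c t =>
    simp only [split1]
    split
    · simp
    · cases h : split1 t <;> simp [preF]

theorem preF_preF (p q : List Char) (ws : List (List Char)) :
    preF p (preF q ws) = preF (p ++ q) ws := by
  cases ws <;> simp [preF]

theorem go_spec (fuel : Nat) (l cur : List Char) (acc : List (List Char))
    (h : l.length ≤ fuel) :
    PySem.Chars.splitOn.go [' '] fuel l cur acc = acc.reverse ++ preF cur.reverse (split1 l) := by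
  induction fuel generalizing l cur acc with
  | zero =>
    have : l = [] := by cases l <;> simp_all
    subst this
    simp [PySem.Chars.splitOn.go, split1, preF]
  | succ f ih =>
    cases l with
    | nil => simp [PySem.Chars.splitOn.go, split1, preF]
    | cons c rest =>
      simp only [PySem.Chars.splitOn.go]
      by_cases hc : c = ' '
      · subst hc
        have hp : [' '].isPrefixOf (' ' :: rest) = true := by simp [List.isPrefixOf]
        rw [if_pos hp]
        rw [ih _ _ _ (by simpa using Nat.le_of_succ_le_succ (by simpa using h))]
        cases hs : split1 rest with
        | nil => exact absurd hs (split1_ne_nil rest)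
        | cons w ws => simp [split1, preF, hs]
      · have hp : [' '].isPrefixOf (c :: rest) = false := by
          simp [List.isPrefixOf]; exact fun h' => hc h'.symm
        rw [if_neg (by simp [hp])]
        rw [ih _ _ _ (by simpa using Nat.le_of_succ_le_succ (by simpa using h))]
        simp [split1, hc, preF_preF]

theorem splitOn_space (l : List Char) : PySem.Chars.splitOn l [' '] = split1 l := by
  rw [PySem.Chars.splitOn, go_spec _ _ _ _ (by omega)]
  cases h : split1 l with
  | nil => exact absurd h (split1_ne_nil l)
  | cons w ws => simp [preF]

-- what one character of the input contributes to A's join-stage output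
def gA (c : Char) : List Char :=
  if c == ' ' then ['!','!','!','!',' '] else [PySem.Chars.upperChar c]

theorem join_prefix (sep x y : List Char) (rest : List (List Char)) :
    PySem.Chars.join sep ((x ++ y) :: rest) = x ++ PySem.Chars.join sep (y :: rest) := by
  cases rest with
  | nil => simp [PySem.Chars.join_singleton]
  | cons r rs => simp [PySem.Chars.join_cons_cons, List.append_assoc]

theorem joinA (l : List Char) :
    PySem.Chars.join [' '] ((split1 l).map (fun w => PySem.Chars.upper w ++ ['!','!','!','!']))
      = l.flatMap gA ++ ['!','!','!','!'] := by
  induction l with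
  | nil => simp [split1, PySem.Chars.join_singleton, PySem.Chars.upper]
  | cons c t ih =>
    obtain ⟨w, ws, hs⟩ : ∃ w ws, split1 t = w :: ws := by
      cases h : split1 t with
      | nil => exact absurd h (split1_ne_nil t)
      | cons w ws => exact ⟨w, ws, rfl⟩
    by_cases hc : c = ' '
    · subst hc
      simp only [split1, beq_self_eq_true, if_pos, hs, List.map_cons] at ih ⊢
      have : PySem.Chars.upper [] ++ ['!','!','!','!'] = ['!','!','!','!'] := by
        simp [PySem.Chars.upper]
      rw [this, PySem.Chars.join_cons_cons, ih]
      simp [gA]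
    · have hb : (c == ' ') = false := by simp [hc]
      simp only [split1, hb, Bool.false_eq_true, if_false, hs, preF, List.map_cons]
      have hup : PySem.Chars.upper (c :: w) ++ ['!','!','!','!']
          = [PySem.Chars.upperChar c] ++ (PySem.Chars.upper w ++ ['!','!','!','!']) := by
        simp [PySem.Chars.upper]
      rw [List.singleton_append, hup, join_prefix]
      rw [hs, List.map_cons] at ih
      rw [ih]
      simp [gA, hb]

theorem rgo_spec (x y : Char) (fuel : Nat) (l acc : List Char) (h : l.length ≤ fuel) :
    PySem.Chars.replace.go [x] [y] fuel l acc
      = acc.reverse ++ l.map (fun c => if c == x then y else c) := by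
  induction fuel generalizing l acc with
  | zero =>
    have : l = [] := by cases l <;> simp_all
    subst this; simp [PySem.Chars.replace.go]
  | succ f ih =>
    cases l with
    | nil => simp [PySem.Chars.replace.go]
    | cons c t =>
      simp only [PySem.Chars.replace.go]
      by_cases hc : c = x
      · subst hc
        have hp : [c].isPrefixOf (c :: t) = true := by simp [List.isPrefixOf]
        rw [if_pos hp]
        rw [ih _ _ (by simpa using Nat.le_of_succ_le_succ (by simpa using h))]
        simp
      · have hp : [x].isPrefixOf (c :: t) = false := by
          simp [List.isPrefixOf]; exact fun h' => hc h'.symm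
        rw [if_neg (by simp [hp])]
        rw [ih _ _ (by simpa using Nat.le_of_succ_le_succ (by simpa using h))]
        simp [hc]

theorem replace_single (l : List Char) (x y : Char) :
    PySem.Chars.replace l [x] [y] = l.map (fun c => if c == x then y else c) := by
  rw [PySem.Chars.replace]
  simp only [List.isEmpty_cons]
  exact rgo_spec x y l.length l [] (le_refl _)

-- the five replace passes, composed into one character map
def rep1 (x y c : Char) : Char := if c == x then y else c

def rho (c : Char) : Char :=
  rep1 'U' '*' (rep1 'O' '*' (rep1 'I' '*' (rep1 'E' '*' (rep1 'A' '@' c))))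

theorem rho_eq_table (u : Char) : rho u = PySem.Dict.getD gordonTable u u := by
  have hit : gordonTable.items = [('A','@'), ('E','*'), ('I','*'), ('O','*'), ('U','*')] := by
    decide
  by_cases hA : u = 'A'
  · subst hA; decide
  by_cases hE : u = 'E'
  · subst hE; decide
  by_cases hI : u = 'I'
  · subst hI; decide
  by_cases hO : u = 'O'
  · subst hO; decide
  by_cases hU : u = 'U'
  · subst hU; decide
  have hA' : ('A' == u) = false := by simp; exact fun h => hA h.symm
  have hE' : ('E' == u) = false := by simp; exact fun h => hE h.symm
  have hI' : ('I' == u) = false := by simp; exact fun h => hI h.symm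
  have hO' : ('O' == u) = false := by simp; exact fun h => hO h.symm
  have hU' : ('U' == u) = false := by simp; exact fun h => hU h.symm
  simp [rho, rep1, PySem.Dict.getD, PySem.Dict.get?, hit, List.find?, hA, hE, hI, hO, hU, hA', hE', hI', hO', hU']

-- what one character of the input contributes to B's output
def gB (c : Char) : List Char :=
  if c == ' ' then ['!','!','!','!',' ']
  else [PySem.Dict.getD gordonTable (PySem.Chars.upperChar c) (PySem.Chars.upperChar c)]

theorem outB (l : List Char) (acc : List Char) :
    l.foldl (fun acc c =>
      if c == ' ' then acc ++ ['!','!','!','!',' ']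
      else
        let u := PySem.Chars.upperChar c
        acc ++ [PySem.Dict.getD gordonTable u u]) acc = acc ++ l.flatMap gB := by
  have hbody : ∀ (acc : List Char) (c : Char), c ∈ l →
      (if c == ' ' then acc ++ ['!','!','!','!',' ']
       else
         let u := PySem.Chars.upperChar c
         acc ++ [PySem.Dict.getD gordonTable u u]) = acc ++ gB c := by
    intro acc c _
    by_cases h : (c == ' ') = true <;> simp [gB, h]
  exact (PySem.List.foldl_congr_mem _ _ _ acc hbody).trans (PySem.List.foldl_append_eq_flatMap ..)

theorem mapRho_gA (c : Char) :
    (gA c).map rho = gB c := by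
  by_cases h : (c == ' ') = true
  · have : c = ' ' := by simpa using h
    subst this; decide
  · simp only [gA, gB, h, Bool.false_eq_true, if_false, List.map_cons, List.map_nil]
    rw [rho_eq_table]

-- ===== VERDICT (by name: the statement is the Claim_ definition above) =====
theorem gordon_spec : Claim_equal_gordon := by
  intro a _
  unfold Spec_gordon
  apply String.toList_inj.mp
  have hA5 : "AEIOU".toList = ['A','E','I','O','U'] := rfl
  simp only [gordon, hA5, List.foldl_cons, List.foldl_nil]
  simp only [show ('A' == 'A') = true from rfl, show ('E' == 'A') = false from rfl,
    show ('I' == 'A') = false from rfl, show ('O' == 'A') = false from rfl,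
    show ('U' == 'A') = false from rfl, if_true, Bool.false_eq_true, if_false]
  have hsep : (" " : String).toList = [' '] := rfl
  have hsp := PySem.Str.split?_map a " "
  rw [hsep] at hsp
  cases hmatch : PySem.Str.split? a " " with
  | none =>
    rw [hmatch] at hsp
    simp [PySem.Chars.split?] at hsp
  | some ws =>
    rw [hmatch] at hsp
    rw [PySem.Chars.split?] at hsp
    simp only [List.isEmpty_cons, Bool.false_eq_true, if_false, Option.map_some,
      Option.some.injEq] at hsp
    have hws : ws.map String.toList = split1 a.toList := by
      rw [hsp, splitOn_space]
    simp only [Option.getD_some]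
    rw [PySem.Str.toList_replace, PySem.Str.toList_replace, PySem.Str.toList_replace,
      PySem.Str.toList_replace, PySem.Str.toList_replace, PySem.Str.toList_join]
    have hparts : (ws.map (fun x => PySem.Str.upper x ++ "!!!!")).map String.toList
        = (split1 a.toList).map (fun w => PySem.Chars.upper w ++ ['!','!','!','!']) := by
      rw [List.map_map, ← hws, List.map_map]
      apply List.map_congr_left
      intro x _
      show (PySem.Str.upper x ++ "!!!!").toList = _
      rw [String.toList_append, PySem.Str.toList_upper]
      rfl
    rw [hparts, hsep, joinA]
    have h1 : (String.ofList ['A']).toList = ['A'] := rfl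
    have h2 : (String.ofList ['E']).toList = ['E'] := rfl
    have h3 : (String.ofList ['I']).toList = ['I'] := rfl
    have h4 : (String.ofList ['O']).toList = ['O'] := rfl
    have h5 : (String.ofList ['U']).toList = ['U'] := rfl
    have h6 : ("@" : String).toList = ['@'] := rfl
    have h7 : ("*" : String).toList = ['*'] := rfl
    rw [h1, h2, h3, h4, h5, h6, h7, replace_single, replace_single, replace_single,
      replace_single, replace_single]
    simp only [List.map_map, List.map_append, List.map_flatMap]
    have hcomp : ((fun c => if c == 'U' then '*' else c) ∘ (fun c => if c == 'O' then '*' else c)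
        ∘ (fun c => if c == 'I' then '*' else c) ∘ (fun c => if c == 'E' then '*' else c)
        ∘ (fun c => if c == 'A' then '@' else c)) = rho := by
      funext c; rfl
    rw [hcomp]
    have hbang : List.map rho ['!','!','!','!'] = ['!','!','!','!'] := by decide
    rw [hbang, List.flatMap_congr (g := gB) (fun c _ => mapRho_gA c)]
    simp only [gordon_alt]
    rw [String.toList_ofList, outB]
    simp
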